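-- pv_equiv track=rewrite | github.com/GuilhermeGML/Exercios-em-Python | 1321 Jollo.py | menor_carta
-- ===== SOURCE A (Python) =====
-- def menor_carta(princesa, principe):
--     todas_cartas = set(range(1, 53))
--     usadas = set(princesa + principe)
--     disponiveis = sorted(todas_cartas - usadas)
--
--     def conta_vitorias(cartas1, cartas2):
--         vitorias = 0
--         for c1, c2 in zip(sorted(cartas1), sorted(cartas2)):
--             if c1 > c2:
--                 vitorias += 1
--         return vitorias
--
--     for candidata in disponiveis:
--         principe_completo = principe + [candidata]
--         ganha_todas = True
--
--         for p1 in princesa: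
--             for p2 in princesa:
--                 if p1 != p2:
--                     for p3 in princesa:
--                         if p3 != p1 and p3 != p2:
--                             ordem_princesa = [p1, p2, p3]
--                             if conta_vitorias(principe_completo, ordem_princesa) < 2:
--                                 ganha_todas = False
--                                 break
--                     if not ganha_todas:
--                         break
--             if not ganha_todas:
--                 break
--
--         if ganha_todas:
--             return candidata
--
--     return 1*(-1)
-- ===== SOURCE B (Python) =====
-- def menor_carta(princesa, principe):
--     usadas = set(princesa) | set(principe)
--     valores = sorted(set(princesa))
--     # the prince beats every ordering of the princess's cards iff he beats her
--     # three largest distinct values (the win count only drops as her cards grow)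
--     top3 = valores[-3:] if len(valores) >= 3 else None
--     base = sorted(principe)
--     for carta in range(1, 53):
--         if carta in usadas:
--             continue
--         if top3 is None:
--             return carta
--         mao = sorted(base + [carta])
--         if _vitorias(mao, top3) >= 2:
--             return carta
--     return -1
--
--
-- def _vitorias(mao, cartas):
--     return sum(1 for a, b in zip(mao, sorted(cartas)) if a > b)
-- ===== Notes on version B (the rewrite author's own statement) =====
-- stated objective: alternative
-- what changed: Replaced A's three nested permutation loops (with break flags) by a single test per candidate against the three largest distinct princess values, using the fact that the sorted-hands win count can only drop as the opponent's cards grow; the used-card set and the sorted prince hand are computed once.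
import Mathlib
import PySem

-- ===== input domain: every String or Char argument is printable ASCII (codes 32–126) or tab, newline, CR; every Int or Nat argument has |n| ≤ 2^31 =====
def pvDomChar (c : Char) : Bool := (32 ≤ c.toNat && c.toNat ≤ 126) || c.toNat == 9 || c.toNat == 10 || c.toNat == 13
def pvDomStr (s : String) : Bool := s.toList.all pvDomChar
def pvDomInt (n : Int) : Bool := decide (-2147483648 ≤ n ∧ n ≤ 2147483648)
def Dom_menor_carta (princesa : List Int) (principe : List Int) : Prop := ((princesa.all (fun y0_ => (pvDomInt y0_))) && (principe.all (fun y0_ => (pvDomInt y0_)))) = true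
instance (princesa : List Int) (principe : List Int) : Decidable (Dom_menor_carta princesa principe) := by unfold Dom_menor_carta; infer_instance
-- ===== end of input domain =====

-- B drops A's three nested permutation loops entirely: since the win count sorts both hands
-- and only drops as the princess's cards grow, it suffices to test the three largest distinct
-- princess values once per candidate; objective: alternative (a different algorithm).

-- ===== PORT A =====
def contaVitorias (cartas1 cartas2 : List Int) : Int :=
  ((PySem.List.sorted cartas1 (fun x => x)).zip (PySem.List.sorted cartas2 (fun x => x))).foldl
    (fun vitorias p => if p.1 > p.2 then vitorias + 1 else vitorias) 0

-- the 'for p3 in princesa' loop; returns the ganha_todas flag (break = returning false)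
def loop3 (princCompleto : List Int) (p1 p2 : Int) : List Int → Bool
  | [] => true
  | p3 :: rest =>
    if p3 ≠ p1 ∧ p3 ≠ p2 then
      if contaVitorias princCompleto [p1, p2, p3] < 2 then false
      else loop3 princCompleto p1 p2 rest
    else loop3 princCompleto p1 p2 rest

-- the 'for p2 in princesa' loop
def loop2 (princesa princCompleto : List Int) (p1 : Int) : List Int → Bool
  | [] => true
  | p2 :: rest =>
    if p1 ≠ p2 then
      if loop3 princCompleto p1 p2 princesa then loop2 princesa princCompleto p1 rest else false
    else loop2 princesa princCompleto p1 rest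

-- the 'for p1 in princesa' loop
def loop1 (princesa princCompleto : List Int) : List Int → Bool
  | [] => true
  | p1 :: rest =>
    if loop2 princesa princCompleto p1 princesa then loop1 princesa princCompleto rest else false

-- the 'for candidata in disponiveis' loop with its early return
def menorGo (princesa principe : List Int) : List Int → Int
  | [] => 1 * (-1)
  | candidata :: rest =>
    if loop1 princesa (principe ++ [candidata]) princesa then candidata
    else menorGo princesa principe rest

def menor_carta (princesa : List Int) (principe : List Int) : Int :=
  let todas := PySem.Set.ofList (PySem.List.pyRange 1 53 1)
  let usadas := PySem.Set.ofList (princesa ++ principe)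
  let disponiveis := PySem.List.sorted (PySem.Set.diff todas usadas) (fun x => x)
  menorGo princesa principe disponiveis

-- ===== PORT B =====
def vitorias (mao cartas : List Int) : Int :=
  ((mao.zip (PySem.List.sorted cartas (fun x => x))).countP
    (fun p => decide (p.1 > p.2)) : Int)

-- the 'for carta in range(1, 53)' loop
def altGo (usadas : List Int) (top3 : Option (List Int)) (base : List Int) : List Int → Int
  | [] => -1
  | carta :: rest =>
    if PySem.Set.contains usadas carta then altGo usadas top3 base rest
    else
      match top3 with
      | none => carta
      | some t =>
        if 2 ≤ vitorias (PySem.List.sorted (base ++ [carta]) (fun x => x)) t then carta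
        else altGo usadas top3 base rest

def menor_carta_alt (princesa : List Int) (principe : List Int) : Int :=
  let usadas := PySem.Set.union (PySem.Set.ofList princesa) principe
  let valores := PySem.List.sorted (PySem.Set.ofList princesa) (fun x => x)
  let top3 := if 3 ≤ valores.length
    then some (PySem.List.slice valores (some (-3)) none) else none
  let base := PySem.List.sorted principe (fun x => x)
  altGo usadas top3 base (PySem.List.pyRange 1 53 1)

-- ===== PRECONDITION & SPEC =====
def Spec_menor_carta (princesa : List Int) (principe : List Int) (out : Int) : Prop := out = menor_carta_alt princesa principe
instance (princesa : List Int) (principe : List Int) (out : Int) : Decidable (Spec_menor_carta princesa principe out) := by unfold Spec_menor_carta; infer_instance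

-- ===== CLAIM (what is proved, stated in full; the proofs are below) =====
def Claim_equal_menor_carta : Prop := ∀ (princesa : List Int) (principe : List Int), Dom_menor_carta princesa principe → Spec_menor_carta princesa principe (menor_carta princesa principe)

-- ===== LEMMAS AND PROOFS =====

-- A's ganha_todas condition, as a proposition
def GanhaP (princesa princCompleto : List Int) : Prop :=
  ∀ p1 ∈ princesa, ∀ p2 ∈ princesa, p1 ≠ p2 →
    ∀ p3 ∈ princesa, p3 ≠ p1 → p3 ≠ p2 → 2 ≤ contaVitorias princCompleto [p1, p2, p3]

theorem foldl_count (l : List (Int × Int)) (acc : Int) :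
    l.foldl (fun v p => if p.1 > p.2 then v + 1 else v) acc
      = acc + (l.countP (fun p => decide (p.1 > p.2)) : Int) := by
  induction l generalizing acc with
  | nil => simp
  | cons h t ih =>
    simp only [List.foldl_cons, List.countP_cons, decide_eq_true_eq]
    split_ifs with hh
    · rw [ih]; push_cast; ring
    · rw [ih]; simp

theorem contaVitorias_eq_vitorias (hand cartas : List Int) :
    contaVitorias hand cartas = vitorias (PySem.List.sorted hand (fun a => a)) cartas := by
  simp [contaVitorias, vitorias, foldl_count]

theorem loop3_iff (h : List Int) (p1 p2 : Int) (l : List Int) :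
    loop3 h p1 p2 l = true ↔
      ∀ p3 ∈ l, p3 ≠ p1 → p3 ≠ p2 → 2 ≤ contaVitorias h [p1, p2, p3] := by
  induction l with
  | nil => simp [loop3]
  | cons a t ih =>
    simp only [loop3]
    split_ifs with h1 h2
    · constructor
      · intro hf; exact absurd hf (by simp)
      · intro hall; exact absurd (hall a (by simp) h1.1 h1.2) (by omega)
    · simp only [ih, List.mem_cons]
      constructor
      · intro hall p3 hp3 hn1 hn2
        rcases hp3 with rfl | hp3
        · omega
        · exact hall p3 hp3 hn1 hn2
      · intro hall p3 hp3 hn1 hn2; exact hall p3 (Or.inr hp3) hn1 hn2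
    · simp only [ih, List.mem_cons]
      constructor
      · intro hall p3 hp3 hn1 hn2
        rcases hp3 with rfl | hp3
        · exact absurd ⟨hn1, hn2⟩ h1
        · exact hall p3 hp3 hn1 hn2
      · intro hall p3 hp3 hn1 hn2; exact hall p3 (Or.inr hp3) hn1 hn2

theorem loop2_iff (princesa h : List Int) (p1 : Int) (l : List Int) :
    loop2 princesa h p1 l = true ↔
      ∀ p2 ∈ l, p1 ≠ p2 → loop3 h p1 p2 princesa = true := by
  induction l with
  | nil => simp [loop2]
  | cons a t ih =>
    simp only [loop2]
    split_ifs with h1 h2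
    · simp only [ih, List.mem_cons]
      constructor
      · intro hall p2 hp2 hne
        rcases hp2 with rfl | hp2
        · exact h2
        · exact hall p2 hp2 hne
      · intro hall p2 hp2 hne; exact hall p2 (Or.inr hp2) hne
    · constructor
      · intro hf; exact absurd hf (by simp)
      · intro hall; exact absurd (hall a (by simp) h1) h2
    · simp only [ih, List.mem_cons]
      constructor
      · intro hall p2 hp2 hne
        rcases hp2 with rfl | hp2
        · exact absurd hne h1
        · exact hall p2 hp2 hne
      · intro hall p2 hp2 hne; exact hall p2 (Or.inr hp2) hne

theorem loop1_iff (princesa h : List Int) (l : List Int) :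
    loop1 princesa h l = true ↔ ∀ p1 ∈ l, loop2 princesa h p1 princesa = true := by
  induction l with
  | nil => simp [loop1]
  | cons a t ih =>
    simp only [loop1]
    split_ifs with h1
    · simp only [ih, List.mem_cons]
      constructor
      · intro hall p1 hp1
        rcases hp1 with rfl | hp1
        · exact h1
        · exact hall p1 hp1
      · intro hall p1 hp1; exact hall p1 (Or.inr hp1)
    · constructor
      · intro hf; exact absurd hf (by simp)
      · intro hall; exact absurd (hall a (by simp)) h1

theorem loop1_iff_ganha (princesa h : List Int) :
    loop1 princesa h princesa = true ↔ GanhaP princesa h := by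
  simp only [loop1_iff, loop2_iff, loop3_iff, GanhaP]

-- sorted hand after a candidate is appended to the pre-sorted prince hand
theorem mao_eq (principe : List Int) (c : Int) :
    PySem.List.sorted (PySem.List.sorted principe (fun x => x) ++ [c]) (fun x => x)
      = PySem.List.sorted (principe ++ [c]) (fun x => x) :=
  PySem.List.sorted_eq_sorted_of_perm _ _ _ (fun _ _ h => h)
    ((PySem.List.sorted_perm principe _ _).append_right [c])

theorem disponiveis_eq (usadas : List Int) :
    PySem.List.sorted (PySem.Set.diff (PySem.Set.ofList (PySem.List.pyRange 1 53 1)) usadas)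
        (fun x => x)
      = (PySem.List.pyRange 1 53 1).filter (fun c => !(PySem.Set.contains usadas c)) := by
  have h1 : PySem.Set.ofList (PySem.List.pyRange 1 53 1) = PySem.List.pyRange 1 53 1 :=
    PySem.Set.ofList_eq_self_of_nodup _ (PySem.List.nodup_pyRange_one 1 53)
  have h2 : PySem.Set.diff (PySem.List.pyRange 1 53 1) usadas
      = (PySem.List.pyRange 1 53 1).filter (fun c => !(PySem.Set.contains usadas c)) := rfl
  rw [h1, h2]
  exact PySem.List.sorted_eq_self_of_pairwise _ _
    (((PySem.List.pairwise_lt_pyRange_one 1 53).filter _).imp (fun h => le_of_lt h))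

theorem contains_eq (princesa principe : List Int) (c : Int) :
    PySem.Set.contains (PySem.Set.ofList (princesa ++ principe)) c
      = PySem.Set.contains (PySem.Set.union (PySem.Set.ofList princesa) principe) c := by
  rw [Bool.eq_iff_iff]
  simp only [PySem.Set.contains_iff, PySem.Set.mem_ofList, PySem.Set.mem_union,
    List.mem_append]

def valoresOf (princesa : List Int) : List Int :=
  PySem.List.sorted (PySem.Set.ofList princesa) (fun x => x)

theorem mem_valoresOf (princesa : List Int) (v : Int) :
    v ∈ valoresOf princesa ↔ v ∈ princesa := by
  rw [valoresOf, PySem.List.mem_sorted, PySem.Set.mem_ofList]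

theorem valoresOf_lt (princesa : List Int) :
    (valoresOf princesa).Pairwise (· < ·) :=
  PySem.List.sorted_ofList_pairwise_lt princesa

theorem nodup_triple {p1 p2 p3 : Int} (h12 : p1 ≠ p2) (h31 : p3 ≠ p1) (h32 : p3 ≠ p2) :
    ([p1, p2, p3] : List Int).Nodup := by
  simp only [List.nodup_cons, List.mem_cons, not_or, List.not_mem_nil, not_false_iff,
    and_true, List.nodup_nil]
  exact ⟨⟨h12, fun h => h31 h.symm⟩, fun h => h32 h.symm⟩

-- fewer than three distinct princess values: the permutation check is vacuous
theorem ganha_of_short (princesa hand : List Int) (h : (valoresOf princesa).length < 3) :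
    GanhaP princesa hand := by
  intro p1 hp1 p2 hp2 h12 p3 hp3 h31 h32
  exfalso
  have hsub : ([p1, p2, p3] : List Int) ⊆ valoresOf princesa := by
    intro x hx
    rw [mem_valoresOf]
    simp only [List.mem_cons, List.not_mem_nil, or_false] at hx
    rcases hx with rfl | rfl | rfl
    exacts [hp1, hp2, hp3]
  have := ((nodup_triple h12 h31 h32).subperm hsub).length_le
  simp at this
  omega

-- monotonicity of the win count in the opponent's (3-card) hand
theorem count3_mono (xs : List Int) (x y z a b c : Int)
    (h1 : x ≤ a) (h2 : y ≤ b) (h3 : z ≤ c) :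
    (xs.zip [a, b, c]).countP (fun p => decide (p.1 > p.2))
      ≤ (xs.zip [x, y, z]).countP (fun p => decide (p.1 > p.2)) := by
  rcases xs with _ | ⟨u, _ | ⟨v, _ | ⟨w, rest⟩⟩⟩ <;>
    simp only [List.zip_nil_left, List.zip_cons_cons, List.zip_nil_right, List.countP_nil,
      List.countP_cons, decide_eq_true_eq]
  all_goals first
    | omega
    | (split_ifs <;> omega)

-- the heart of the equivalence: beating the top three distinct values is enough
theorem ganha_iff_top3 (princesa hand : List Int) (h3 : 3 ≤ (valoresOf princesa).length) :
    GanhaP princesa hand ↔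
      2 ≤ contaVitorias hand ((valoresOf princesa).drop ((valoresOf princesa).length - 3)) := by
  obtain ⟨m1, m2, m3, hT⟩ := List.length_eq_three.mp
    (show ((valoresOf princesa).drop ((valoresOf princesa).length - 3)).length = 3 by
      simp only [List.length_drop]; omega)
  have hsplit : valoresOf princesa
      = (valoresOf princesa).take ((valoresOf princesa).length - 3) ++ [m1, m2, m3] := by
    rw [← hT, List.take_append_drop]
  have hpw := valoresOf_lt princesa
  rw [hsplit, List.pairwise_append] at hpw
  obtain ⟨-, hpwT, hfront⟩ := hpw
  have hm12 : m1 < m2 := by simp at hpwT; omega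
  have hm23 : m2 < m3 := by simp at hpwT; omega
  have hclass : ∀ v ∈ valoresOf princesa, v = m3 ∨ v = m2 ∨ v ≤ m1 := by
    intro v hv
    rw [hsplit, List.mem_append] at hv
    rcases hv with hv | hv
    · have := hfront v hv m1 (by simp)
      omega
    · simp only [List.mem_cons, List.not_mem_nil, or_false] at hv
      rcases hv with rfl | rfl | rfl <;> omega
  have hmmem : ∀ m ∈ ([m1, m2, m3] : List Int), m ∈ princesa := by
    intro m hm
    rw [← mem_valoresOf, hsplit, List.mem_append]
    exact Or.inr hm
  have hsortT : PySem.List.sorted ([m1, m2, m3] : List Int) (fun x => x) = [m1, m2, m3] :=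
    PySem.List.sorted_eq_self_of_pairwise _ _ (by
      simp only [List.pairwise_cons, List.mem_cons, List.not_mem_nil, or_false,
        List.Pairwise.nil, and_true]
      constructor
      · rintro a (rfl | rfl) <;> omega
      · constructor
        · rintro a rfl; omega
        · simp)
  rw [hT]
  constructor
  · intro hP
    have := hP m1 (hmmem m1 (by simp)) m2 (hmmem m2 (by simp)) (by omega)
      m3 (hmmem m3 (by simp)) (by omega) (by omega)
    exact this
  · intro htop p1 hp1 p2 hp2 h12 p3 hp3 h31 h32
    -- sort the chosen triple
    have hperm := PySem.List.sorted_perm ([p1, p2, p3] : List Int) (fun x => x) false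
    obtain ⟨x, y, z, hs⟩ := List.length_eq_three.mp
      (by rw [hperm.length_eq]; rfl)
    have hpair := PySem.List.sorted_pairwise ([p1, p2, p3] : List Int) (fun x => x)
    have hnd : (PySem.List.sorted ([p1, p2, p3] : List Int) (fun x => x)).Nodup :=
      (hperm.nodup_iff).mpr (nodup_triple h12 h31 h32)
    rw [hs] at hperm hpair hnd
    have hp1' := List.pairwise_cons.mp hpair
    have hp2' := List.pairwise_cons.mp hp1'.2
    have hnd' : x ≠ y ∧ x ≠ z ∧ y ≠ z := by
      simp only [List.nodup_cons, List.mem_cons, not_or, List.not_mem_nil, not_false_iff,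
        and_true, List.nodup_nil] at hnd
      exact ⟨hnd.1.1, hnd.1.2, hnd.2⟩
    have hxy : x < y := lt_of_le_of_ne (hp1'.1 y (by simp)) hnd'.1
    have hyz : y < z := lt_of_le_of_ne (hp2'.1 z (by simp)) hnd'.2.2
    have hmemv : ∀ w ∈ ([x, y, z] : List Int), w ∈ valoresOf princesa := by
      intro w hw
      rw [mem_valoresOf]
      have : w ∈ ([p1, p2, p3] : List Int) := hperm.subset hw
      simp only [List.mem_cons, List.not_mem_nil, or_false] at this
      rcases this with rfl | rfl | rfl
      exacts [hp1, hp2, hp3]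
    have hz3 : z ≤ m3 := by
      rcases hclass z (hmemv z (by simp)) with h | h | h <;> omega
    have hy2 : y ≤ m2 := by
      rcases hclass y (hmemv y (by simp)) with h | h | h <;> omega
    have hx1 : x ≤ m1 := by
      rcases hclass x (hmemv x (by simp)) with h | h | h
      · omega
      · -- x = m2 would force y and z both above m2: impossible
        exfalso
        rcases hclass y (hmemv y (by simp)) with h' | h' | h' <;> omega
      · omega
    have hconta : contaVitorias hand [p1, p2, p3]
        = (((PySem.List.sorted hand (fun a => a)).zip [x, y, z]).countP
            (fun p => decide (p.1 > p.2)) : Int) := by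
      rw [contaVitorias_eq_vitorias, vitorias, hs]
    have htop' : (2 : Int) ≤ (((PySem.List.sorted hand (fun a => a)).zip [m1, m2, m3]).countP
        (fun p => decide (p.1 > p.2)) : Int) := by
      rw [contaVitorias_eq_vitorias, vitorias, hsortT] at htop
      exact htop
    have hmono := count3_mono (PySem.List.sorted hand (fun a => a)) x y z m1 m2 m3 hx1 hy2 hz3
    rw [hconta]
    omega

theorem go_eq (princesa principe : List Int) (l : List Int) :
    menorGo princesa principe
        (l.filter (fun c => !(PySem.Set.contains (PySem.Set.ofList (princesa ++ principe)) c)))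
      = altGo (PySem.Set.union (PySem.Set.ofList princesa) principe)
          (if 3 ≤ (valoresOf princesa).length
            then some (PySem.List.slice (valoresOf princesa) (some (-3)) none) else none)
          (PySem.List.sorted principe (fun x => x)) l := by
  have hslice : PySem.List.slice (valoresOf princesa) (some (-3)) none
      = (valoresOf princesa).drop ((valoresOf princesa).length - 3) :=
    PySem.List.slice_from_neg_ofNat (valoresOf princesa) 3 (by omega)
  by_cases h3 : 3 ≤ (valoresOf princesa).length
  · rw [if_pos h3]
    induction l with
    | nil => simp only [List.filter_nil, menorGo, altGo]; norm_num
    | cons c rest ih =>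
      rw [List.filter_cons, altGo]
      cases hcv : PySem.Set.contains (PySem.Set.ofList (princesa ++ principe)) c with
      | true =>
        have hcB : PySem.Set.contains (PySem.Set.union (PySem.Set.ofList princesa) principe) c
            = true := by rw [← contains_eq]; exact hcv
        simp only [hcB, if_true, Bool.not_true, Bool.false_eq_true, not_false_iff, if_neg, ih]
      | false =>
        have hcB : PySem.Set.contains (PySem.Set.union (PySem.Set.ofList princesa) principe) c
            = false := by rw [← contains_eq]; exact hcv
        simp only [hcB, Bool.not_false, if_pos, Bool.false_eq_true, if_false, menorGo]
        have hflag : (loop1 princesa (principe ++ [c]) princesa = true) ↔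
            2 ≤ vitorias
              (PySem.List.sorted (PySem.List.sorted principe (fun x => x) ++ [c]) (fun x => x))
              (PySem.List.slice (valoresOf princesa) (some (-3)) none) := by
          rw [loop1_iff_ganha, ganha_iff_top3 princesa (principe ++ [c]) h3, hslice,
            contaVitorias_eq_vitorias, mao_eq]
        by_cases hl : loop1 princesa (principe ++ [c]) princesa = true
        · rw [if_pos hl, if_pos (hflag.mp hl)]
        · rw [if_neg hl, if_neg (fun h => hl (hflag.mpr h)), ih]
  · rw [if_neg h3]
    induction l with
    | nil => simp only [List.filter_nil, menorGo, altGo]; norm_num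
    | cons c rest ih =>
      rw [List.filter_cons, altGo]
      cases hcv : PySem.Set.contains (PySem.Set.ofList (princesa ++ principe)) c with
      | true =>
        have hcB : PySem.Set.contains (PySem.Set.union (PySem.Set.ofList princesa) principe) c
            = true := by rw [← contains_eq]; exact hcv
        simp only [hcB, if_true, Bool.not_true, Bool.false_eq_true, not_false_iff, if_neg, ih]
      | false =>
        have hcB : PySem.Set.contains (PySem.Set.union (PySem.Set.ofList princesa) principe) c
            = false := by rw [← contains_eq]; exact hcv
        simp only [hcB, Bool.not_false, if_pos, Bool.false_eq_true, if_false, menorGo]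
        have : loop1 princesa (principe ++ [c]) princesa = true :=
          (loop1_iff_ganha _ _).mpr (ganha_of_short princesa _ (by omega))
        rw [if_pos this]

-- ===== VERDICT (by name: the statement is the Claim_ definition above) =====
theorem menor_carta_spec : Claim_equal_menor_carta := by
  intro princesa principe _hdom
  unfold Spec_menor_carta
  show menorGo princesa principe
      (PySem.List.sorted (PySem.Set.diff (PySem.Set.ofList (PySem.List.pyRange 1 53 1))
        (PySem.Set.ofList (princesa ++ principe))) (fun x => x)) = _
  rw [disponiveis_eq]
  exact go_eq princesa principe _
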